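-- pv_equiv track=rewrite | github.com/mcuelenaere/advent_of_code | advent_of_code/2017/day3/part2.py | get_adjacent_sum
-- ===== SOURCE A (Python) =====
-- def get_adjacent_sum(matrix, x, y):
--     n = len(matrix)
--     s = 0
--     offsets = (
--         (0, 0),
--         (1, 0),
--         (1, 1),
--         (0, 1),
--         (-1, 1),
--         (-1, 0),
--         (-1, -1),
--         (0, -1),
--         (1, -1),
--     )
--     for dx, dy in offsets:
--         _x = x + dx
--         _y = y + dy
--         if _x >= n or _x < 0:
--             continue
--         elif _y >= n or _y < 0:
--             continue
--         s += matrix[_x][_y]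
--     return s
-- ===== SOURCE B (Python) =====
-- def get_adjacent_sum(matrix, x, y):
--     n = len(matrix)
--     r0, r1 = max(0, x - 1), max(0, min(x + 2, n))
--     c0, c1 = max(0, y - 1), max(0, min(y + 2, n))
--     return sum(v for row in matrix[r0:r1] for v in row[c0:c1])
-- ===== Notes on version B (the rewrite author's own statement) =====
-- stated objective: simpler
-- what changed: B computes the clamped 3x3 window bounds once and sums the sliced submatrix in one comprehension, instead of iterating nine fixed offsets with per-offset bounds checks and continue.
import Mathlib
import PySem

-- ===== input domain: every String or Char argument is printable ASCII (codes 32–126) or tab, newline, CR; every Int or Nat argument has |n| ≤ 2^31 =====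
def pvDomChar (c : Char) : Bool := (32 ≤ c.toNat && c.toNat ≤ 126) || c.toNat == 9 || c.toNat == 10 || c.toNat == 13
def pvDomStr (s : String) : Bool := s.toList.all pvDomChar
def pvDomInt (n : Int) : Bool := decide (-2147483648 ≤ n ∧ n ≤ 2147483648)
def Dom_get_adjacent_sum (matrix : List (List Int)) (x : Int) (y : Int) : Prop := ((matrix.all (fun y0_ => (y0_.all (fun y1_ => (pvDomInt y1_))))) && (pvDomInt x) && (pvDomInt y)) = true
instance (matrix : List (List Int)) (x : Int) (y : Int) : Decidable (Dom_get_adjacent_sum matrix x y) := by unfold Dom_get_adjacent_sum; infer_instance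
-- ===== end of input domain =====

-- B replaces the nine offset/bounds checks by two clamped slices over the 3x3 window (simpler decomposition, same cost).

-- ===== PORT A =====
-- literal transliteration of A: fold over the 9 offsets, two continue-guards, indexed access
def get_adjacent_sum (matrix : List (List Int)) (x : Int) (y : Int) : Int :=
  let n : Int := matrix.length
  let offsets : List (Int × Int) :=
    [(0, 0), (1, 0), (1, 1), (0, 1), (-1, 1), (-1, 0), (-1, -1), (0, -1), (1, -1)]
  offsets.foldl (fun s d =>
    let _x := x + d.1
    let _y := y + d.2
    if _x ≥ n ∨ _x < 0 then s
    else if _y ≥ n ∨ _y < 0 then s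
    else s + ((PySem.List.pyGet? ((PySem.List.pyGet? matrix _x).getD []) _y).getD 0)) 0

-- ===== PORT B =====
-- literal transliteration of B: clamp the window bounds once, then sum the sliced submatrix
def get_adjacent_sum_alt (matrix : List (List Int)) (x : Int) (y : Int) : Int :=
  let n : Int := matrix.length
  let r0 := max 0 (x - 1)
  let r1 := max 0 (min (x + 2) n)
  let c0 := max 0 (y - 1)
  let c1 := max 0 (min (y + 2) n)
  ((PySem.List.slice matrix (some r0) (some r1)).flatMap
      (fun row => PySem.List.slice row (some c0) (some c1))).sum

-- ===== PRECONDITION & SPEC =====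
-- Pre_ excludes exactly the ragged matrices on which A raises IndexError: some row inside
-- the 3x3 row window is shorter than an in-range column index of the column window.
def Pre_get_adjacent_sum (matrix : List (List Int)) (x : Int) (y : Int) : Prop :=
  ∀ i : Fin matrix.length, x - 1 ≤ (i : Int) → (i : Int) ≤ x + 1 →
    ∀ j : Fin matrix.length, y - 1 ≤ (j : Int) → (j : Int) ≤ y + 1 →
      (j : Nat) < (matrix.get i).length
instance (matrix : List (List Int)) (x : Int) (y : Int) : Decidable (Pre_get_adjacent_sum matrix x y) := by unfold Pre_get_adjacent_sum; infer_instance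

def pvWitness_get_adjacent_sum : List (List Int) × Int × Int := ([[1, 2, 3], [4, 5, 6], [7, 8, 9]], 1, 1)

def Spec_get_adjacent_sum (matrix : List (List Int)) (x : Int) (y : Int) (out : Int) : Prop := out = get_adjacent_sum_alt matrix x y
instance (matrix : List (List Int)) (x : Int) (y : Int) (out : Int) : Decidable (Spec_get_adjacent_sum matrix x y out) := by unfold Spec_get_adjacent_sum; infer_instance

-- ===== CLAIM (what is proved, stated in full; the proofs are below) =====
def Claim_equal_get_adjacent_sum : Prop := ∀ (matrix : List (List Int)) (x : Int) (y : Int), Dom_get_adjacent_sum matrix x y → Pre_get_adjacent_sum matrix x y → Spec_get_adjacent_sum matrix x y (get_adjacent_sum matrix x y)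

-- ===== LEMMAS AND PROOFS =====

-- canonical guarded cell value: matrix[i][j] if both indices lie in [0, n)
def pvCell (matrix : List (List Int)) (n : Nat) (i j : Int) : Int :=
  if 0 ≤ i ∧ i < (n : Int) ∧ 0 ≤ j ∧ j < (n : Int)
  then (((matrix[i.toNat]?).getD [])[j.toNat]?).getD 0 else 0

def pvOpt {α : Type} (n : Nat) (l : List α) (i : Int) : List α :=
  if 0 ≤ i ∧ i < (n : Int) then (l[i.toNat]?).elim [] (fun v => [v]) else []

theorem pvOpt_neg {α : Type} {n : Nat} (l : List α) {i : Int} (hc : ¬(0 ≤ i ∧ i < (n:Int))) :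
    pvOpt n l i = [] := if_neg hc

theorem pvOpt_pos {α : Type} {n : Nat} (l : List α) {i : Int} (h0 : 0 ≤ i) (h1 : i < (n:Int))
    (hl : i.toNat < l.length) : pvOpt n l i = [l[i.toNat]] := by
  simp [pvOpt, h0, h1, List.getElem?_eq_getElem hl]

theorem pv_take1 {α : Type} (l : List α) (a : Nat) (h : a < l.length) :
    (l.drop a).take 1 = [l[a]] := by
  rw [List.drop_eq_getElem_cons h]; rfl

theorem pv_take2 {α : Type} (l : List α) (a : Nat) (h : a + 1 < l.length) :
    (l.drop a).take 2 = [l[a], l[a + 1]] := by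
  rw [List.drop_eq_getElem_cons (show a < l.length by omega),
      List.drop_eq_getElem_cons h]; rfl

theorem pv_take3 {α : Type} (l : List α) (a : Nat) (h : a + 2 < l.length) :
    (l.drop a).take 3 = [l[a], l[a + 1], l[a + 2]] := by
  rw [List.drop_eq_getElem_cons (show a < l.length by omega),
      List.drop_eq_getElem_cons (show a + 1 < l.length by omega),
      List.drop_eq_getElem_cons h]; rfl

theorem pv_slice_window {α : Type} (l : List α) (t : Int) (n : Nat)
    (h : ∀ j : Nat, t - 1 ≤ (j : Int) → (j : Int) ≤ t + 1 → j < n → j < l.length) :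
    PySem.List.slice l (some (max 0 (t - 1))) (some (max 0 (min (t + 2) (n : Int))))
      = pvOpt n l (t - 1) ++ pvOpt n l t ++ pvOpt n l (t + 1) := by
  rw [PySem.List.slice_toNat l (le_max_left _ _) (le_max_left _ _)]
  by_cases h1 : t + 1 < 0
  · rw [pvOpt_neg l (by omega), pvOpt_neg l (by omega), pvOpt_neg l (by omega),
      show (max 0 (min (t + 2) (n : Int))).toNat = 0 by omega]
    simp
  by_cases h2 : (n : Int) ≤ t - 1
  · rw [pvOpt_neg l (by omega), pvOpt_neg l (by omega), pvOpt_neg l (by omega),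
      show (max 0 (min (t + 2) (n : Int))).toNat - (max 0 (t-1)).toNat = 0 by omega]
    simp
  by_cases hn : n = 0
  · subst hn
    rw [pvOpt_neg l (by omega), pvOpt_neg l (by omega), pvOpt_neg l (by omega),
      show (max 0 (min (t + 2) ((0:Nat) : Int))).toNat = 0 by omega]
    simp
  -- now -1 ≤ t ≤ n, n ≥ 1
  by_cases ht : t = -1
  · subst ht
    have hl0 : 0 < l.length := h 0 (by omega) (by omega) (by omega)
    rw [pvOpt_neg l (by omega), pvOpt_neg l (by omega), pvOpt_pos l (by omega) (by omega) (by simpa using hl0),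
      show (max 0 ((-1:Int) - 1)).toNat = 0 by omega,
      show (max 0 (min ((-1:Int) + 2) (n : Int))).toNat - 0 = 1 by omega]
    rw [pv_take1 l 0 hl0]
    norm_num
  by_cases htn : t = (n : Int)
  · have hl0 : n - 1 < l.length := h (n-1) (by omega) (by omega) (by omega)
    rw [pvOpt_pos l (by omega) (by omega) (by rw [show (t-1).toNat = n - 1 by omega]; exact hl0),
      pvOpt_neg l (by omega), pvOpt_neg l (by omega),
      show (max 0 (min (t + 2) (n : Int))).toNat - (max 0 (t-1)).toNat = 1 by omega]
    rw [show (max 0 (t-1)).toNat = n - 1 by omega, pv_take1 l (n-1) hl0]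
    simp [show (t-1).toNat = n - 1 from by omega]
  -- 0 ≤ t ≤ n-1
  by_cases ht0 : t = 0
  · subst ht0
    by_cases hn1 : n = 1
    · have hl0 : 0 < l.length := h 0 (by omega) (by omega) (by omega)
      rw [pvOpt_neg l (by omega), pvOpt_pos l (by omega) (by omega) (by simpa using hl0),
        pvOpt_neg l (by omega),
        show (max 0 ((0:Int) - 1)).toNat = 0 by omega,
        show (max 0 (min ((0:Int) + 2) (n : Int))).toNat - 0 = 1 by omega]
      rw [pv_take1 l 0 hl0]
      norm_num
    · have hl1 : 1 < l.length := h 1 (by omega) (by omega) (by omega)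
      rw [pvOpt_neg l (by omega), pvOpt_pos l (by omega) (by omega) (by simpa using by omega : (0:Int).toNat < l.length),
        pvOpt_pos l (by omega) (by omega) (by rw [show ((0:Int)+1).toNat = 1 by omega]; exact hl1),
        show (max 0 ((0:Int) - 1)).toNat = 0 by omega,
        show (max 0 (min ((0:Int) + 2) (n : Int))).toNat - 0 = 2 by omega]
      rw [pv_take2 l 0 (by omega)]
      norm_num
  by_cases htn1 : t = (n : Int) - 1
  · -- 1 ≤ t = n-1
    have hl1 : n - 1 < l.length := h (n-1) (by omega) (by omega) (by omega)
    have ha : (max 0 (t-1)).toNat = n - 2 := by omega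
    rw [pvOpt_pos l (by omega) (by omega) (by rw [show (t-1).toNat = n-2 by omega]; omega),
      pvOpt_pos l (by omega) (by omega) (by rw [show t.toNat = n-1 by omega]; exact hl1),
      pvOpt_neg l (by omega),
      show (max 0 (min (t + 2) (n : Int))).toNat - (max 0 (t-1)).toNat = 2 by omega, ha]
    rw [pv_take2 l (n-2) (by omega)]
    simp [show (t-1).toNat = n-2 from by omega, show t.toNat = n-1 from by omega,
      show n-2+1 = n-1 from by omega]
  · -- 1 ≤ t ≤ n-2
    have hl2 : (t+1).toNat < l.length := h (t+1).toNat (by omega) (by omega) (by omega)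
    have ha : (max 0 (t-1)).toNat = (t-1).toNat := by omega
    rw [pvOpt_pos l (by omega) (by omega) (by omega),
      pvOpt_pos l (by omega) (by omega) (by omega),
      pvOpt_pos l (by omega) (by omega) (by omega),
      show (max 0 (min (t + 2) (n : Int))).toNat - (max 0 (t-1)).toNat = 3 by omega, ha]
    rw [pv_take3 l (t-1).toNat (by omega)]
    simp [show t.toNat - 1 + 1 = t.toNat from by omega, show t.toNat - 1 + 2 = (t+1).toNat from by omega,
      show (t-1).toNat = t.toNat - 1 from by omega]


-- one loop step of A equals adding the guarded cell value
theorem pv_step (matrix : List (List Int)) (s i j : Int) :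
    (if i ≥ (matrix.length : Int) ∨ i < 0 then s
     else if j ≥ (matrix.length : Int) ∨ j < 0 then s
     else s + ((PySem.List.pyGet? ((PySem.List.pyGet? matrix i).getD []) j).getD 0))
    = s + pvCell matrix matrix.length i j := by
  unfold pvCell
  split_ifs with h1 h2 h3 h3 <;> try omega
  · rw [PySem.List.pyGet?_of_nonneg matrix (show (0:Int) ≤ i by omega),
        PySem.List.pyGet?_of_nonneg _ (show (0:Int) ≤ j by omega)]

theorem pv_colsum (matrix : List (List Int)) (x y : Int) (pre : Pre_get_adjacent_sum matrix x y)
    (i : Int) (hi1 : x - 1 ≤ i) (hi2 : i ≤ x + 1) :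
    ((pvOpt matrix.length matrix i).flatMap
        (fun row => PySem.List.slice row (some (max 0 (y - 1)))
          (some (max 0 (min (y + 2) (matrix.length : Int)))))).sum
      = pvCell matrix matrix.length i (y - 1) + pvCell matrix matrix.length i y
        + pvCell matrix matrix.length i (y + 1) := by
  by_cases hc : 0 ≤ i ∧ i < (matrix.length : Int)
  · have hil : i.toNat < matrix.length := by omega
    rw [pvOpt_pos matrix hc.1 hc.2 hil]
    have hrow : ∀ j : Nat, y - 1 ≤ (j : Int) → (j : Int) ≤ y + 1 → j < matrix.length →
        j < (matrix[i.toNat]).length := by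
      intro j hj1 hj2 hj3
      have := pre ⟨i.toNat, hil⟩ (by simp; omega) (by simp; omega)
        ⟨j, hj3⟩ (by simpa using hj1) (by simpa using hj2)
      simpa [List.get_eq_getElem] using this
    simp only [List.flatMap_cons, List.flatMap_nil, List.append_nil]
    rw [pv_slice_window (matrix[i.toNat]) y matrix.length hrow]
    have hcell : ∀ j : Int, pvCell matrix matrix.length i j = (pvOpt matrix.length (matrix[i.toNat]) j).sum := by
      intro j
      unfold pvCell pvOpt
      by_cases hj : 0 ≤ j ∧ j < (matrix.length : Int)
      · rw [if_pos (⟨hc.1, hc.2, hj.1, hj.2⟩ : 0 ≤ i ∧ i < (matrix.length:Int) ∧ 0 ≤ j ∧ j < (matrix.length:Int)), if_pos hj,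
          List.getElem?_eq_getElem hil]
        simp only [Option.getD_some]
        cases hget : (matrix[i.toNat])[j.toNat]? <;> simp
      · rw [if_neg (fun hh => hj ⟨hh.2.2.1, hh.2.2.2⟩), if_neg hj]
        rfl
    simp [hcell]
    ring
  · rw [pvOpt_neg matrix hc]
    have : ∀ j : Int, pvCell matrix matrix.length i j = 0 := by
      intro j; unfold pvCell; rw [if_neg (by tauto)]
    simp [this]

theorem pv_sum_flatMap_window (matrix : List (List Int)) (x y : Int)
    (pre : Pre_get_adjacent_sum matrix x y) :
    get_adjacent_sum_alt matrix x y =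
      pvCell matrix matrix.length (x-1) (y-1) + pvCell matrix matrix.length (x-1) y + pvCell matrix matrix.length (x-1) (y+1)
      + (pvCell matrix matrix.length x (y-1) + pvCell matrix matrix.length x y + pvCell matrix matrix.length x (y+1))
      + (pvCell matrix matrix.length (x+1) (y-1) + pvCell matrix matrix.length (x+1) y + pvCell matrix matrix.length (x+1) (y+1)) := by
  simp only [get_adjacent_sum_alt]
  rw [pv_slice_window matrix x matrix.length (fun j _ _ hj => hj)]
  simp only [List.flatMap_append, List.sum_append]
  rw [pv_colsum matrix x y pre (x-1) (by omega) (by omega),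
      pv_colsum matrix x y pre x (by omega) (by omega),
      pv_colsum matrix x y pre (x+1) (by omega) (by omega)]

theorem pv_a_eq (matrix : List (List Int)) (x y : Int) :
    get_adjacent_sum matrix x y =
      pvCell matrix matrix.length (x-1) (y-1) + pvCell matrix matrix.length (x-1) y + pvCell matrix matrix.length (x-1) (y+1)
      + (pvCell matrix matrix.length x (y-1) + pvCell matrix matrix.length x y + pvCell matrix matrix.length x (y+1))
      + (pvCell matrix matrix.length (x+1) (y-1) + pvCell matrix matrix.length (x+1) y + pvCell matrix matrix.length (x+1) (y+1)) := by
  unfold get_adjacent_sum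
  simp only [List.foldl_cons, List.foldl_nil, pv_step]
  have e0 : x + 0 = x := by ring
  have e1 : x + -1 = x - 1 := by ring
  have f0 : y + 0 = y := by ring
  have f1 : y + -1 = y - 1 := by ring
  rw [e0, e1, f0, f1]
  ring

-- ===== VERDICT (by name: the statement is the Claim_ definition above) =====
theorem get_adjacent_sum_spec : Claim_equal_get_adjacent_sum := by
  intro matrix x y _ pre
  unfold Spec_get_adjacent_sum
  rw [pv_a_eq, pv_sum_flatMap_window matrix x y pre]
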